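-- pv_equiv track=rewrite | github.com/alinatl/bot | mp.py | find_sentense_with_a
-- ===== SOURCE A (Python) =====
-- def find_sentense_with_a(posl):
--   if '! ' in posl or '. ' in posl:
--     return False
--   else:
--     for i in posl:
--       if i in ':;–':
--         return False
--   return True
-- ===== SOURCE B (Python) =====
-- def find_sentense_with_a(posl):
--     prev = ''
--     for c in posl:
--         if c in ':;–' or (c == ' ' and prev in ('!', '.')):
--             return False
--         prev = c
--     return True
-- ===== Notes on version B (the rewrite author's own statement) =====
-- stated objective: alternative
-- what changed: Replaced A's two substring membership searches plus a separate per-character loop by a single left-to-right pass that carries the previous character and rejects on a forbidden character or on a space preceded by a sentence-ending mark.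
import Mathlib
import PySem

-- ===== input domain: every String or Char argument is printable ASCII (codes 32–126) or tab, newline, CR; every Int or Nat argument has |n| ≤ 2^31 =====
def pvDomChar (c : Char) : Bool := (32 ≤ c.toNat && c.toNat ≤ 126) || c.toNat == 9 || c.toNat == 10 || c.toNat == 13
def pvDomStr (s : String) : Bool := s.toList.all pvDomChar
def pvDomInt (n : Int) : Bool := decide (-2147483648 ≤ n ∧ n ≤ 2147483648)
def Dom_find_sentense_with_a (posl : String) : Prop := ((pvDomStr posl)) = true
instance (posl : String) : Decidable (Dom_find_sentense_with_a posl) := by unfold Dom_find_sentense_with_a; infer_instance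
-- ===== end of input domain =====

-- B replaces A's two substring searches plus a separate character loop by ONE stateful
-- left-to-right pass that remembers the previous character (objective: alternative, same cost).

-- ===== PORT A =====
-- the 'for i in posl: if i in ':;–': return False' loop, early return as recursion
def findA_loop : List Char → Bool
  | [] => true
  | c :: rest => if c = ':' ∨ c = ';' ∨ c = '–' then false else findA_loop rest

def find_sentense_with_a (posl : String) : Bool :=
  if PySem.Str.isIn "! " posl || PySem.Str.isIn ". " posl then false
  else findA_loop posl.toList

-- ===== PORT B =====
-- Python's prev starts as '' and then holds single characters; modelled exactly as
-- Option Char (none = '', some c = the one-character string), tuple membership as equations.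
def findB_loop : Option Char → List Char → Bool
  | _, [] => true
  | prev, c :: rest =>
    if c = ':' ∨ c = ';' ∨ c = '–' ∨ (c = ' ' ∧ (prev = some '!' ∨ prev = some '.')) then false
    else findB_loop (some c) rest

def find_sentense_with_a_alt (posl : String) : Bool := findB_loop none posl.toList

-- ===== PRECONDITION & SPEC =====
def Spec_find_sentense_with_a (posl : String) (out : Bool) : Prop := out = find_sentense_with_a_alt posl
instance (posl : String) (out : Bool) : Decidable (Spec_find_sentense_with_a posl out) := by unfold Spec_find_sentense_with_a; infer_instance

-- ===== CLAIM (what is proved, stated in full; the proofs are below) =====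
def Claim_equal_find_sentense_with_a : Prop := ∀ (posl : String), Dom_find_sentense_with_a posl → Spec_find_sentense_with_a posl (find_sentense_with_a posl)

-- ===== LEMMAS AND PROOFS =====

def badChar (c : Char) : Bool := c = ':' || c = ';' || c = '–'

def hasPat : Option Char → List Char → Bool
  | _, [] => false
  | prev, c :: rest => ((prev = some '!' || prev = some '.') && c = ' ') || hasPat (some c) rest

theorem findA_loop_eq_any : ∀ l : List Char, findA_loop l = !(l.any badChar) := by
  intro l
  induction l with
  | nil => rfl
  | cons c rest ih =>
    simp [findA_loop, badChar, List.any_cons]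
    by_cases h1 : c = ':' <;> by_cases h2 : c = ';' <;> by_cases h3 : c = '–' <;>
      simp [h1, h2, h3, ih]

theorem findB_loop_eq : ∀ (l : List Char) (prev : Option Char),
    findB_loop prev l = !(l.any badChar || hasPat prev l) := by
  intro l
  induction l with
  | nil => intro prev; rfl
  | cons c rest ih =>
    intro prev
    simp only [findB_loop, hasPat, List.any_cons, badChar]
    by_cases h1 : c = ':' <;> by_cases h2 : c = ';' <;> by_cases h3 : c = '–' <;>
      by_cases hc : c = ' ' <;>
        by_cases hp : prev = some '!' ∨ prev = some '.' <;>
          first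
            | (rcases hp with hp | hp <;> simp_all)
            | simp_all [ih]

theorem two_prefix (x : Char) (c : Char) (rest : List Char) :
    ([x, ' '] <+: c :: rest) ↔ (c = x ∧ rest.head? = some ' ') := by
  cases rest with
  | nil => simp [List.cons_prefix_cons]
  | cons d t => simp [List.cons_prefix_cons, eq_comm]

theorem hasPat_iff : ∀ (l : List Char) (prev : Option Char),
    hasPat prev l = true ↔
      ((prev = some '!' ∨ prev = some '.') ∧ l.head? = some ' ') ∨
        ['!', ' '] <:+: l ∨ ['.', ' '] <:+: l := by
  intro l
  induction l with
  | nil => intro prev; simp [hasPat]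
  | cons c rest ih =>
    intro prev
    simp only [hasPat, List.head?_cons, Bool.or_eq_true, Bool.and_eq_true, ih,
      List.infix_cons_iff, two_prefix, decide_eq_true_eq, Option.some.injEq]
    tauto

theorem hasPat_none (l : List Char) :
    hasPat none l = (decide (['!', ' '] <:+: l) || decide (['.', ' '] <:+: l)) := by
  rw [Bool.eq_iff_iff]
  simp [hasPat_iff]

-- ===== VERDICT (by name: the statement is the Claim_ definition above) =====
theorem find_sentense_with_a_spec : Claim_equal_find_sentense_with_a := by
  intro posl _
  unfold Spec_find_sentense_with_a find_sentense_with_a find_sentense_with_a_alt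
  rw [findB_loop_eq, hasPat_none, findA_loop_eq_any]
  have e1 : PySem.Str.isIn "! " posl = true ↔ ['!', ' '] <:+: posl.toList := by
    simpa using PySem.Str.isIn_iff_infix "! " posl
  have e2 : PySem.Str.isIn ". " posl = true ↔ ['.', ' '] <:+: posl.toList := by
    simpa using PySem.Str.isIn_iff_infix ". " posl
  by_cases h1 : ['!', ' '] <:+: posl.toList <;> by_cases h2 : ['.', ' '] <:+: posl.toList <;>
    simp_all
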